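-- pv_equiv track=rewrite | github.com/semanurcetintas/client-server- | server.py | _matrix_cofactor_matrix
-- ===== SOURCE A (Python) =====
-- def _matrix_det_mod(mat, mod: int) -> int:
--     n = len(mat)
--     if n == 1:
--         return mat[0][0] % mod
--     if n == 2:
--         return (mat[0][0]*mat[1][1] - mat[0][1]*mat[1][0]) % mod
--     det = 0
--     for c in range(n):
--         sub = [row[:c] + row[c+1:] for row in mat[1:]]
--         cofactor = ((-1) ** c) * mat[0][c] * _matrix_det_mod(sub, mod)
--         det += cofactor
--     return det % mod
--
-- def _matrix_minor(mat, r, c):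
--     return [row[:c] + row[c+1:] for i, row in enumerate(mat) if i != r]
--
-- def _matrix_cofactor_matrix(mat, mod: int):
--     n = len(mat)
--     cof = [[0]*n for _ in range(n)]
--     for r in range(n):
--         for c in range(n):
--             minor = _matrix_minor(mat, r, c)
--             det_minor = _matrix_det_mod(minor, mod)
--             cof[r][c] = ((-1) ** (r+c)) * det_minor % mod
--     return cof
-- ===== SOURCE B (Python) =====
-- def _det_cols(rows, cols, memo):
--     # exact integer determinant of the submatrix formed by the last len(cols)
--     # rows of `rows` and the columns listed in `cols`; memoised on the column set
--     if not cols: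
--         return 1
--     if cols in memo:
--         return memo[cols]
--     row = rows[len(rows) - len(cols)]
--     det = 0
--     sign = 1
--     for i in range(len(cols)):
--         det += sign * row[cols[i]] * _det_cols(rows, cols[:i] + cols[i + 1:], memo)
--         sign = -sign
--     memo[cols] = det
--     return det
--
-- def _matrix_cofactor_matrix(mat, mod: int):
--     n = len(mat)
--     cof = []
--     for r in range(n):
--         rows = mat[:r] + mat[r + 1:]
--         memo = {}
--         row_out = []
--         for c in range(n):
--             cols = tuple(j for j in range(n) if j != c)
--             row_out.append((-1) ** (r + c) * _det_cols(rows, cols, memo) % mod)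
--         cof.append(row_out)
--     return cof
-- ===== Notes on version B (the rewrite author's own statement) =====
-- stated objective: faster
-- what changed: B replaces A's naive recursive cofactor expansion with intermediate modular reductions (re-slicing a fresh minor matrix at every step, O(n! ) work per determinant) by a memoised column-subset expansion: each minor's exact integer determinant is computed by Laplace expansion over a list of column indices with a dictionary keyed by the remaining column tuple, shared across the cells of a cofactor row, and reduced mod only at the end.
-- intended difference: On 1x1 matrices (with mod not in {1,-1}) A returns [[0]] because it takes the determinant of the empty 0x0 minor to be 0, while B returns [[1 % mod]], the correct cofactor matrix of a 1x1 matrix (the empty determinant is 1). — e.g. on _matrix_cofactor_matrix([[5]], 7): A returns [[0]], B returns [[1]]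
import Mathlib
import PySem

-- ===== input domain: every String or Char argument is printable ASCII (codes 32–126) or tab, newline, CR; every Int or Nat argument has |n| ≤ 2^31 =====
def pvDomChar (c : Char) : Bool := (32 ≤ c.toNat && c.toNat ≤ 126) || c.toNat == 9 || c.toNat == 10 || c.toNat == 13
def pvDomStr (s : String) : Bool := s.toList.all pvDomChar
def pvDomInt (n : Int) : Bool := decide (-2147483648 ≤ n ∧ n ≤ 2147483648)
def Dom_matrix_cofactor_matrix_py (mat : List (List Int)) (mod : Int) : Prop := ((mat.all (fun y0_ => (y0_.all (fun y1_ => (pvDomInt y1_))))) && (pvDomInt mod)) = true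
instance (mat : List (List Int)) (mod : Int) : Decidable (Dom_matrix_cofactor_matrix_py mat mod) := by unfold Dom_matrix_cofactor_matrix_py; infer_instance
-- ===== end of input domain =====

-- B computes each minor's exact integer determinant by a memoised expansion over column-index
-- tuples (dictionary shared across a cofactor row) and reduces mod once at the end, instead of
-- A's naive recursive expansion over freshly sliced minors; on 1x1 matrices B returns the
-- intended [[1 % mod]] where A returns [[0]] (stated as D_ below).


-- ===== PORT A =====
-- _matrix_minor(mat, r, c): [row[:c] + row[c+1:] for i, row in enumerate(mat) if i != r]
-- (List.zipIdx is Python's enumerate with the pair components swapped: (row, i))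
def minorA (mat : List (List Int)) (r c : Int) : List (List Int) :=
  ((mat.zipIdx).filter (fun p => ((p.2 : Int) != r))).map
    (fun p => PySem.List.slice p.1 none (some c) ++ PySem.List.slice p.1 (some (c + 1)) none)

mutual
-- _matrix_det_mod(mat, mod)
def detA (mat : List (List Int)) (m : Int) : Int :=
  if mat.length = 1 then
    PySem.Int.mod (PySem.List.pyGetD (PySem.List.pyGetD mat 0 []) 0 0) m
  else if mat.length = 2 then
    PySem.Int.mod (PySem.List.pyGetD (PySem.List.pyGetD mat 0 []) 0 0 *
        PySem.List.pyGetD (PySem.List.pyGetD mat 1 []) 1 0 -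
        PySem.List.pyGetD (PySem.List.pyGetD mat 0 []) 1 0 *
        PySem.List.pyGetD (PySem.List.pyGetD mat 1 []) 0 0) m
  else
    -- for c in range(n): sub = [row[:c]+row[c+1:] for row in mat[1:]]; det += (-1)**c * mat[0][c] * det(sub)
    match mat with
    | [] => PySem.Int.mod 0 m
    | row0 :: rest =>
      PySem.Int.mod (detALoop row0 rest m (PySem.List.pyRange 0 ((rest.length + 1 : Nat) : Int) 1) 0) m
termination_by (mat.length, 1, 0)
decreasing_by simp [Prod.lex_def]

def detALoop (row0 : List Int) (rest : List (List Int)) (m : Int) (cs : List Int) (det : Int) : Int :=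
  match cs with
  | [] => det
  | c :: cs' =>
    detALoop row0 rest m cs'
      (det + (-1 : Int) ^ c.toNat * PySem.List.pyGetD row0 c 0 *
        detA (rest.map (fun row => PySem.List.slice row none (some c) ++
          PySem.List.slice row (some (c + 1)) none)) m)
termination_by (rest.length + 1, 0, cs.length)
decreasing_by
  · simp [Prod.lex_def]
  · simp [Prod.lex_def]
end

def matrix_cofactor_matrix_py (mat : List (List Int)) (mod : Int) : List (List Int) :=
  -- cof = [[0]*n for _ in range(n)]; for r in range(n): for c in range(n):
  --   cof[r][c] = (-1)**(r+c) * _matrix_det_mod(_matrix_minor(mat, r, c), mod) % mod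
  (PySem.List.pyRange 0 (mat.length : Int) 1).foldl (fun cof r =>
    (PySem.List.pyRange 0 (mat.length : Int) 1).foldl (fun cof c =>
      PySem.List.pySetD cof r
        (PySem.List.pySetD (PySem.List.pyGetD cof r []) c
          (PySem.Int.mod ((-1 : Int) ^ (r + c).toNat * detA (minorA mat r c) mod) mod))) cof)
    ((PySem.List.pyRange 0 (mat.length : Int) 1).map
      (fun _ => PySem.List.pyRepeat [(0 : Int)] (mat.length : Int)))

-- ===== PORT B =====
mutual
-- _det_cols(rows, cols, memo)
def bdet (rows : List (List Int)) (cols : List Int) (memo : PySem.Dict (List Int) Int) :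
    Int × PySem.Dict (List Int) Int :=
  if _h : cols = [] then (1, memo)
  else
    match memo.get? cols with
    | some v => (v, memo)
    | none =>
      ((bdetLoop rows cols
          (PySem.List.pyGetD rows ((rows.length : Int) - (cols.length : Int)) []) 0 0 1 memo).1,
        ((bdetLoop rows cols
          (PySem.List.pyGetD rows ((rows.length : Int) - (cols.length : Int)) []) 0 0 1 memo).2).insert cols
          (bdetLoop rows cols
            (PySem.List.pyGetD rows ((rows.length : Int) - (cols.length : Int)) []) 0 0 1 memo).1)
termination_by (cols.length, 1, 0)
decreasing_by all_goals simp [Prod.lex_def]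

-- for i in range(len(cols)): det += sign * row[cols[i]] * _det_cols(rows, cols[:i]+cols[i+1:], memo); sign = -sign
def bdetLoop (rows : List (List Int)) (cols : List Int) (row : List Int) (i : Nat)
    (det : Int) (sign : Int) (memo : PySem.Dict (List Int) Int) :
    Int × PySem.Dict (List Int) Int :=
  if _h : i < cols.length then
    bdetLoop rows cols row (i + 1)
      (det + sign * PySem.List.pyGetD row (PySem.List.pyGetD cols (i : Int) 0) 0 *
        (bdet rows (PySem.List.slice cols none (some (i : Int)) ++
          PySem.List.slice cols (some ((i : Int) + 1)) none) memo).1)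
      (-sign)
      (bdet rows (PySem.List.slice cols none (some (i : Int)) ++
        PySem.List.slice cols (some ((i : Int) + 1)) none) memo).2
  else (det, memo)
termination_by (cols.length, 0, cols.length - i)
decreasing_by
  all_goals simp [Prod.lex_def, PySem.List.slice_to_natCast]
  all_goals first
    | omega
    | (rw [show ((i : Int) + 1) = (((i + 1 : Nat)) : Int) by push_cast; ring,
        PySem.List.slice_from_natCast]
       simp
       omega)
end

def matrix_cofactor_matrix_py_alt (mat : List (List Int)) (mod : Int) : List (List Int) :=
  -- for r in range(n): rows = mat[:r] + mat[r+1:]; memo = {}; row_out = []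
  --   for c in range(n): cols = tuple(j for j in range(n) if j != c)
  --     row_out.append((-1)**(r+c) * _det_cols(rows, cols, memo) % mod)
  --   cof.append(row_out)
  (PySem.List.pyRange 0 (mat.length : Int) 1).foldl (fun cof r =>
    cof ++ [((PySem.List.pyRange 0 (mat.length : Int) 1).foldl
      (fun (st : List Int × PySem.Dict (List Int) Int) c =>
        (st.1 ++ [PySem.Int.mod ((-1 : Int) ^ (r + c).toNat *
            (bdet (PySem.List.slice mat none (some r) ++ PySem.List.slice mat (some (r + 1)) none)
              ((PySem.List.pyRange 0 (mat.length : Int) 1).filter (fun j => j != c)) st.2).1) mod],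
          (bdet (PySem.List.slice mat none (some r) ++ PySem.List.slice mat (some (r + 1)) none)
            ((PySem.List.pyRange 0 (mat.length : Int) 1).filter (fun j => j != c)) st.2).2))
      ([], PySem.Dict.empty)).1]) []

-- ===== PRECONDITION & SPEC =====
-- Pre_ excludes exactly the inputs on which A raises: mod = 0 with a nonempty matrix
-- (ZeroDivisionError in the final '%'), and a matrix of 2 or more rows in which some row is
-- shorter than the number of rows (IndexError while expanding a minor's determinant).
def Pre_matrix_cofactor_matrix_py (mat : List (List Int)) (mod : Int) : Prop :=
  (mod ≠ 0 ∨ mat = []) ∧ (2 ≤ mat.length → ∀ row ∈ mat, mat.length ≤ row.length)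
instance (mat : List (List Int)) (mod : Int) : Decidable (Pre_matrix_cofactor_matrix_py mat mod) := by
  unfold Pre_matrix_cofactor_matrix_py; infer_instance

def pvWitness_matrix_cofactor_matrix_py : List (List Int) × Int := ([[1, 2], [3, 4]], 7)

-- On 1x1 matrices (with mod not in {1,-1}) A returns [[0]] because it takes the determinant of
-- the empty 0x0 minor to be 0, while B returns [[1 % mod]], the correct cofactor matrix of a
-- 1x1 matrix (the empty determinant is 1).
def D_matrix_cofactor_matrix_py (mat : List (List Int)) (mod : Int) : Prop :=
  mat.length = 1 ∧ mod ≠ 1 ∧ mod ≠ -1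
instance (mat : List (List Int)) (mod : Int) : Decidable (D_matrix_cofactor_matrix_py mat mod) := by
  unfold D_matrix_cofactor_matrix_py; infer_instance

def Spec_matrix_cofactor_matrix_py (mat : List (List Int)) (mod : Int) (out : List (List Int)) : Prop :=
  ¬ D_matrix_cofactor_matrix_py mat mod → out = matrix_cofactor_matrix_py_alt mat mod
instance (mat : List (List Int)) (mod : Int) (out : List (List Int)) :
    Decidable (Spec_matrix_cofactor_matrix_py mat mod out) := by
  unfold Spec_matrix_cofactor_matrix_py; infer_instance

def pvDiffWitness_matrix_cofactor_matrix_py : List (List Int) × Int := ([[5]], 7)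
def pvDiffWitnessOut_matrix_cofactor_matrix_py : (List (List Int)) × (List (List Int)) := ([[0]], [[1]])

-- ===== CLAIM (what is proved, stated in full; the proofs are below) =====
def Claim_unchanged_matrix_cofactor_matrix_py : Prop :=
  ∀ (mat : List (List Int)) (mod : Int), Dom_matrix_cofactor_matrix_py mat mod →
    Pre_matrix_cofactor_matrix_py mat mod →
    Spec_matrix_cofactor_matrix_py mat mod (matrix_cofactor_matrix_py mat mod)
def Claim_changed_matrix_cofactor_matrix_py : Prop :=
  Dom_matrix_cofactor_matrix_py (pvDiffWitness_matrix_cofactor_matrix_py.1) (pvDiffWitness_matrix_cofactor_matrix_py.2) ∧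
  Pre_matrix_cofactor_matrix_py (pvDiffWitness_matrix_cofactor_matrix_py.1) (pvDiffWitness_matrix_cofactor_matrix_py.2) ∧
  D_matrix_cofactor_matrix_py (pvDiffWitness_matrix_cofactor_matrix_py.1) (pvDiffWitness_matrix_cofactor_matrix_py.2) ∧
  matrix_cofactor_matrix_py (pvDiffWitness_matrix_cofactor_matrix_py.1) (pvDiffWitness_matrix_cofactor_matrix_py.2) = pvDiffWitnessOut_matrix_cofactor_matrix_py.1 ∧
  matrix_cofactor_matrix_py_alt (pvDiffWitness_matrix_cofactor_matrix_py.1) (pvDiffWitness_matrix_cofactor_matrix_py.2) = pvDiffWitnessOut_matrix_cofactor_matrix_py.2 ∧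
  pvDiffWitnessOut_matrix_cofactor_matrix_py.1 ≠ pvDiffWitnessOut_matrix_cofactor_matrix_py.2
def Claim_exact_matrix_cofactor_matrix_py : Prop :=
  ∀ (mat : List (List Int)) (mod : Int), Dom_matrix_cofactor_matrix_py mat mod →
    Pre_matrix_cofactor_matrix_py mat mod → D_matrix_cofactor_matrix_py mat mod →
    matrix_cofactor_matrix_py mat mod ≠ matrix_cofactor_matrix_py_alt mat mod

-- ===== LEMMAS AND PROOFS =====

-- Python '%': basic facts used to collapse A's intermediate reductions
theorem pymod_sub_dvd (x m : Int) : m ∣ (x - PySem.Int.mod x m) := by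
  have h := PySem.Int.floordiv_mul_add_mod x m
  exact ⟨PySem.Int.floordiv x m, by linarith⟩

theorem pymod_congr {x y m : Int} (hm : m ≠ 0) (h : m ∣ (x - y)) :
    PySem.Int.mod x m = PySem.Int.mod y m := by
  have hx := pymod_sub_dvd x m
  have hy := pymod_sub_dvd y m
  have hd : m ∣ (PySem.Int.mod x m - PySem.Int.mod y m) := by
    have he : PySem.Int.mod x m - PySem.Int.mod y m
        = (x - y) - (x - PySem.Int.mod x m) + (y - PySem.Int.mod y m) := by ring
    rw [he]; exact dvd_add (dvd_sub h hx) hy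
  have hz : PySem.Int.mod x m - PySem.Int.mod y m = 0 := by
    apply Int.eq_zero_of_abs_lt_dvd ((abs_dvd m _).mpr hd)
    rw [abs_lt]
    rcases lt_or_gt_of_ne hm with hneg | hpos
    · have b1 := PySem.Int.mod_neg_bounds x hneg
      have b2 := PySem.Int.mod_neg_bounds y hneg
      rw [abs_of_neg hneg]; omega
    · have b1 := PySem.Int.mod_nonneg x hpos
      have b2 := PySem.Int.mod_lt x hpos
      have b3 := PySem.Int.mod_nonneg y hpos
      have b4 := PySem.Int.mod_lt y hpos
      rw [abs_of_pos hpos]; omega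
  omega

theorem pymod_zero_left {m : Int} (hm : m ≠ 0) : PySem.Int.mod 0 m = 0 := by
  have hd : m ∣ PySem.Int.mod 0 m := by simpa using (pymod_sub_dvd 0 m).neg_right
  apply Int.eq_zero_of_abs_lt_dvd ((abs_dvd m _).mpr hd)
  rw [abs_lt]
  rcases lt_or_gt_of_ne hm with hneg | hpos
  · have b1 := PySem.Int.mod_neg_bounds 0 hneg
    rw [abs_of_neg hneg]; omega
  · have b1 := PySem.Int.mod_nonneg 0 hpos
    have b2 := PySem.Int.mod_lt 0 hpos
    rw [abs_of_pos hpos]; omega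

theorem pymod_pm_one {m : Int} (hm : m = 1 ∨ m = -1) (x : Int) : PySem.Int.mod x m = 0 := by
  rcases hm with h | h <;> subst h
  · have b1 : 0 ≤ PySem.Int.mod x 1 := PySem.Int.mod_nonneg x (by norm_num)
    have b2 : PySem.Int.mod x 1 < 1 := PySem.Int.mod_lt x (by norm_num)
    omega
  · have b := PySem.Int.mod_neg_bounds x (show (-1 : Int) < 0 by norm_num)
    omega

-- dvd of a difference of sums, termwise
theorem dvd_sum_sub {m : Int} {ι : Type} (l : List ι) (f g : ι → Int)
    (h : ∀ x ∈ l, m ∣ (f x - g x)) :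
    m ∣ ((l.map f).sum - (l.map g).sum) := by
  induction l with
  | nil => simp
  | cons x xs ih =>
    simp only [List.map_cons, List.sum_cons]
    have h1 := h x (by simp)
    have h2 := ih (fun y hy => h y (by simp [hy]))
    have he : f x + (xs.map f).sum - (g x + (xs.map g).sum)
        = (f x - g x) + ((xs.map f).sum - (xs.map g).sum) := by ring
    rw [he]; exact dvd_add h1 h2

-- remove entry at index c: the Nat form of xs[:c] + xs[c+1:]
def rmc {α : Type} (c : Nat) (l : List α) : List α := l.take c ++ l.drop (c + 1)

theorem rmc_length {α : Type} (c : Nat) (l : List α) (h : c < l.length) :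
    (rmc c l).length = l.length - 1 := by
  simp [rmc]; omega

theorem rmc_get (c j : Nat) (row : List Int) (hc : c < row.length) (hj : j < row.length - 1) :
    PySem.List.pyGetD (rmc c row) (j : Int) 0 =
      if j < c then PySem.List.pyGetD row (j : Int) 0
      else PySem.List.pyGetD row ((j + 1 : Nat) : Int) 0 := by
  have hL : j < (row.take c ++ row.drop (c + 1)).length := by simp; omega
  simp only [PySem.List.pyGetD_natCast, rmc]
  rw [List.getD_eq_getElem _ _ hL]
  split_ifs with h
  · rw [List.getElem_append_left (by simp; omega)]
    rw [List.getElem_take]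
    rw [List.getD_eq_getElem _ _ (by omega)]
  · rw [List.getElem_append_right (by simp; omega)]
    rw [List.getElem_drop]
    rw [List.getD_eq_getElem _ _ (by omega)]
    congr 1
    simp only [List.length_take]
    omega

theorem mem_rmc {α : Type} {c : Nat} {l : List α} {x : α} (h : x ∈ rmc c l) : x ∈ l := by
  rcases List.mem_append.mp h with h' | h'
  · exact List.mem_of_mem_take h'
  · exact List.mem_of_mem_drop h'

theorem slice_rmc {α : Type} (c : Nat) (l : List α) :
    PySem.List.slice l none (some (c : Int)) ++ PySem.List.slice l (some ((c : Int) + 1)) none = rmc c l := by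
  rw [PySem.List.slice_to_natCast]
  rw [show ((c : Int) + 1) = (((c + 1 : Nat)) : Int) by push_cast; ring, PySem.List.slice_from_natCast]
  rfl

-- the exact determinant specification B computes: Laplace expansion over column-index lists
def specD (rows : List (List Int)) (cols : List Int) : Int :=
  if _h : cols = [] then 1
  else
    ((List.range cols.length).attach.map (fun i =>
      (-1 : Int) ^ i.1 *
        PySem.List.pyGetD (PySem.List.pyGetD rows ((rows.length : Int) - (cols.length : Int)) [])
          (PySem.List.pyGetD cols (i.1 : Int) 0) 0 *
        specD rows (rmc i.1 cols))).sum
termination_by cols.length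
decreasing_by
  have := i.2; simp at this
  simp [rmc]; omega

theorem specD_nil (rows : List (List Int)) : specD rows [] = 1 := by
  simp [specD]

theorem sum_attach_map {α : Type} (l : List α) (f : α → Int) :
    (l.attach.map (fun i => f i.1)).sum = (l.map f).sum := by
  rw [show (fun (i : {x // x ∈ l}) => f i.1) = f ∘ Subtype.val from rfl, ← List.map_map]
  rw [List.attach_map_subtype_val]

theorem specD_eq_sum (rows : List (List Int)) (cols : List Int) (h : cols ≠ []) :
    specD rows cols =
      ((List.range cols.length).map (fun (i : Nat) =>
        (-1 : Int) ^ i *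
          PySem.List.pyGetD (PySem.List.pyGetD rows ((rows.length : Int) - (cols.length : Int)) [])
            (PySem.List.pyGetD cols (i : Int) 0) 0 *
          specD rows (rmc i cols))).sum := by
  rw [specD, dif_neg h]
  exact sum_attach_map (List.range cols.length) (fun (i : Nat) =>
    (-1 : Int) ^ i *
      PySem.List.pyGetD (PySem.List.pyGetD rows ((rows.length : Int) - (cols.length : Int)) [])
        (PySem.List.pyGetD cols (i : Int) 0) 0 *
      specD rows (rmc i cols))

theorem specD_singleton (rows : List (List Int)) (c : Int) :
    specD rows [c] = PySem.List.pyGetD (PySem.List.pyGetD rows ((rows.length : Int) - 1) []) c 0 := by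
  rw [specD_eq_sum rows [c] (by simp)]
  simp [List.range_one, specD_nil, rmc]

theorem specD_pair (rows : List (List Int)) (a b : Int) :
    specD rows [a, b] =
      PySem.List.pyGetD (PySem.List.pyGetD rows ((rows.length : Int) - 2) []) a 0 *
        PySem.List.pyGetD (PySem.List.pyGetD rows ((rows.length : Int) - 1) []) b 0 -
      PySem.List.pyGetD (PySem.List.pyGetD rows ((rows.length : Int) - 2) []) b 0 *
        PySem.List.pyGetD (PySem.List.pyGetD rows ((rows.length : Int) - 1) []) a 0 := by
  rw [specD_eq_sum rows [a, b] (by simp)]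
  rw [show List.range ([a, b].length) = [0, 1] from rfl]
  simp only [List.map_cons, List.map_nil, List.sum_cons, List.sum_nil]
  rw [show rmc 0 [a, b] = [b] from rfl, show rmc 1 [a, b] = [a] from rfl]
  rw [specD_singleton, specD_singleton]
  simp only [Nat.cast_zero, Nat.cast_one]
  rw [show PySem.List.pyGetD [a, b] (0 : Int) 0 = a from rfl,
      show PySem.List.pyGetD [a, b] (1 : Int) 0 = b from rfl]
  rw [show (([a, b] : List Int).length : Int) = 2 from rfl]
  ring

theorem rmc_get_of_map {α : Type} {i : Nat} (f : α → List Int) (l : List α) (d : List Int)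
    (hi : i < l.length) :
    PySem.List.pyGetD (l.map f) (i : Int) d = f l[i] := by
  simp only [PySem.List.pyGetD_natCast]
  rw [List.getD_eq_getElem _ _ (by simp; omega)]
  simp

-- memo invariant: every stored value is the specified determinant of its column list
def MemoInv (rows : List (List Int)) (memo : PySem.Dict (List Int) Int) : Prop :=
  ∀ cs v, memo.get? cs = some v → v = specD rows cs

theorem memoInv_empty (rows : List (List Int)) : MemoInv rows PySem.Dict.empty := by
  intro cs v h
  rw [PySem.Dict.get?_empty] at h
  exact absurd h (by simp)

-- the loop of B's determinant, assuming correctness of bdet for shorter column lists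
theorem bdetLoop_spec (rows : List (List Int)) (cols : List Int) (row : List Int)
    (IH : ∀ cs : List Int, cs.length < cols.length → ∀ memo, MemoInv rows memo →
      (bdet rows cs memo).1 = specD rows cs ∧ MemoInv rows (bdet rows cs memo).2) :
    ∀ (k i : Nat) (det sign : Int) (memo : PySem.Dict (List Int) Int),
      cols.length - i = k → MemoInv rows memo → sign = (-1 : Int) ^ i →
      (bdetLoop rows cols row i det sign memo).1 =
          det + ((List.range' i (cols.length - i)).map (fun (j : Nat) =>
            (-1 : Int) ^ j * PySem.List.pyGetD row (PySem.List.pyGetD cols (j : Int) 0) 0 *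
              specD rows (rmc j cols))).sum ∧
        MemoInv rows (bdetLoop rows cols row i det sign memo).2 := by
  intro k
  induction k with
  | zero =>
    intro i det sign memo hk hmemo _hsign
    rw [bdetLoop]
    rw [dif_neg (show ¬ i < cols.length by omega)]
    rw [hk]
    exact ⟨by simp, hmemo⟩
  | succ k ihk =>
    intro i det sign memo hk hmemo hsign
    have hlt : i < cols.length := by omega
    rw [bdetLoop]
    rw [dif_pos hlt]
    rw [slice_rmc i cols]
    have hlen : (rmc i cols).length < cols.length := by
      rw [rmc_length i cols hlt]; omega
    obtain ⟨hb1, hb2⟩ := IH _ hlen memo hmemo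
    obtain ⟨hr1, hr2⟩ := ihk (i + 1)
      (det + sign * PySem.List.pyGetD row (PySem.List.pyGetD cols (i : Int) 0) 0 *
        (bdet rows (rmc i cols) memo).1)
      (-sign) (bdet rows (rmc i cols) memo).2
      (by omega) hb2 (by rw [hsign, pow_succ]; ring)
    refine ⟨?_, hr2⟩
    rw [hr1, hb1, hsign]
    rw [show cols.length - i = (cols.length - (i + 1)) + 1 by omega, List.range'_succ]
    simp only [List.map_cons, List.sum_cons]
    ring

theorem bdet_spec (rows : List (List Int)) :
    ∀ (n : Nat) (cols : List Int), cols.length = n → ∀ memo, MemoInv rows memo →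
      (bdet rows cols memo).1 = specD rows cols ∧ MemoInv rows (bdet rows cols memo).2 := by
  intro n
  induction n using Nat.strong_induction_on with
  | _ n IHn =>
    intro cols hn memo hmemo
    rw [bdet]
    by_cases hnil : cols = []
    · rw [dif_pos hnil]
      rw [hnil, specD_nil]
      exact ⟨rfl, hmemo⟩
    · rw [dif_neg hnil]
      have IH : ∀ cs : List Int, cs.length < cols.length → ∀ memo', MemoInv rows memo' →
          (bdet rows cs memo').1 = specD rows cs ∧ MemoInv rows (bdet rows cs memo').2 := by
        intro cs hcs memo' hmemo'
        exact IHn cs.length (by omega) cs rfl memo' hmemo'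
      have hL : (bdetLoop rows cols
          (PySem.List.pyGetD rows ((rows.length : Int) - (cols.length : Int)) []) 0 0 1 memo).1 =
          specD rows cols ∧ MemoInv rows (bdetLoop rows cols
            (PySem.List.pyGetD rows ((rows.length : Int) - (cols.length : Int)) []) 0 0 1 memo).2 := by
        obtain ⟨h1, h2⟩ := bdetLoop_spec rows cols
          (PySem.List.pyGetD rows ((rows.length : Int) - (cols.length : Int)) []) IH
          (cols.length - 0) 0 0 1 memo rfl hmemo (by norm_num)
        refine ⟨?_, h2⟩
        rw [h1, zero_add]
        rw [specD_eq_sum rows cols hnil, List.range_eq_range']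
        rw [Nat.sub_zero]
      cases hget : memo.get? cols with
      | some v =>
        exact ⟨hmemo cols v hget, hmemo⟩
      | none =>
        refine ⟨hL.1, ?_⟩
        intro cs v hv
        rw [PySem.Dict.get?_insert] at hv
        split_ifs at hv with hcs
        · have hv' : v = (bdetLoop rows cols
              (PySem.List.pyGetD rows ((rows.length : Int) - (cols.length : Int)) []) 0 0 1 memo).1 :=
            ((Option.some.injEq _ _).mp hv).symm
          rw [hcs, hv']
          exact hL.1
        · exact hL.2 cs v hv

-- A's determinant loop as a sum over the column list
theorem detALoop_sum (row0 : List Int) (rest : List (List Int)) (m : Int) :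
    ∀ (cs : List Int) (det : Int),
      detALoop row0 rest m cs det =
        det + (cs.map (fun c => (-1 : Int) ^ c.toNat * PySem.List.pyGetD row0 c 0 *
          detA (rest.map (fun row => PySem.List.slice row none (some c) ++
            PySem.List.slice row (some (c + 1)) none)) m)).sum := by
  intro cs
  induction cs with
  | nil => intro det; rw [detALoop]; simp
  | cons c cs' ih =>
    intro det
    rw [detALoop]
    rw [ih]
    simp only [List.map_cons, List.sum_cons]
    ring

-- the central lemma: A's recursive modular determinant of any matrix M whose (i,p) entry is
-- rows[rows.length - n + i][cols[p]] equals specD rows cols reduced by Python's %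
theorem detA_eq_specD (m : Int) (hm : m ≠ 0) (rows : List (List Int)) :
    ∀ (n : Nat), 1 ≤ n → ∀ (cols : List Int) (M : List (List Int)),
      cols.length = n → n ≤ rows.length → M.length = n →
      (∀ row ∈ M, n ≤ row.length) →
      (∀ i p : Nat, i < n → p < n →
        PySem.List.pyGetD (PySem.List.pyGetD M (i : Int) []) (p : Int) 0 =
          PySem.List.pyGetD (PySem.List.pyGetD rows ((rows.length - n + i : Nat) : Int) [])
            (PySem.List.pyGetD cols (p : Int) 0) 0) →
      detA M m = PySem.Int.mod (specD rows cols) m := by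
  intro n
  induction n using Nat.strong_induction_on with
  | _ n IHn =>
    intro hn1 cols M hcols hnrows hM hfat hent
    rcases Nat.lt_or_ge n 3 with hlt3 | hge3
    · interval_cases n
      · -- n = 1
        obtain ⟨c0, rfl⟩ := List.length_eq_one_iff.mp hcols
        obtain ⟨r0, rfl⟩ := List.length_eq_one_iff.mp hM
        rw [detA]
        rw [if_pos (by simp)]
        rw [specD_singleton]
        have e00 := hent 0 0 (by omega) (by omega)
        simp only [Nat.cast_zero] at e00
        rw [show PySem.List.pyGetD [c0] (0 : Int) 0 = c0 from rfl] at e00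
        rw [e00]
        rw [show ((rows.length - 1 + 0 : Nat) : Int) = (rows.length : Int) - 1 by omega]
      · -- n = 2
        obtain ⟨a, b, rfl⟩ := List.length_eq_two.mp hcols
        obtain ⟨r0, r1, rfl⟩ := List.length_eq_two.mp hM
        rw [detA]
        rw [if_neg (by simp), if_pos (by simp)]
        rw [specD_pair]
        have e00 := hent 0 0 (by omega) (by omega)
        have e01 := hent 0 1 (by omega) (by omega)
        have e10 := hent 1 0 (by omega) (by omega)
        have e11 := hent 1 1 (by omega) (by omega)
        simp only [Nat.cast_zero, Nat.cast_one] at e00 e01 e10 e11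
        rw [show PySem.List.pyGetD [a, b] (0 : Int) 0 = a from rfl] at e00 e10
        rw [show PySem.List.pyGetD [a, b] (1 : Int) 0 = b from rfl] at e01 e11
        rw [show ((rows.length : Int) - 2) = ((rows.length - 2 + 0 : Nat) : Int) by omega,
            show ((rows.length : Int) - 1) = ((rows.length - 2 + 1 : Nat) : Int) by omega]
        rw [← e00, ← e01, ← e10, ← e11]
    · -- n ≥ 3
      obtain ⟨M0, Mrest, rfl⟩ : ∃ M0 Mrest, M = M0 :: Mrest := by
        cases M with
        | nil => simp at hM; omega
        | cons x xs => exact ⟨x, xs, rfl⟩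
      rw [detA]
      simp only [List.length_cons] at hM ⊢
      rw [if_neg (by omega), if_neg (by omega)]
      rw [detALoop_sum]
      rw [zero_add]
      rw [show ((Mrest.length + 1 : Nat) : Int) = ((n : Nat) : Int) by omega]
      rw [PySem.List.pyRange_zero_nat n, List.map_map]
      have hterm : ∀ k ∈ List.range n,
          ((fun c => (-1 : Int) ^ c.toNat * PySem.List.pyGetD M0 c 0 *
            detA (Mrest.map (fun row => PySem.List.slice row none (some c) ++
              PySem.List.slice row (some (c + 1)) none)) m) ∘ (fun (k : Nat) => (k : Int))) k =
          (-1 : Int) ^ k * PySem.List.pyGetD M0 (k : Int) 0 *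
            PySem.Int.mod (specD rows (rmc k cols)) m := by
        intro k hk
        have hkn : k < n := List.mem_range.mp hk
        simp only [Function.comp_apply, Int.toNat_natCast]
        congr 1
        have hmap : Mrest.map (fun row => PySem.List.slice row none (some ((k : Nat) : Int)) ++
            PySem.List.slice row (some (((k : Nat) : Int) + 1)) none) = Mrest.map (rmc k) := by
          apply List.map_congr_left
          intro row _
          exact slice_rmc k row
        rw [hmap]
        -- apply the induction hypothesis at size n - 1
        apply IHn (n - 1) (by omega) (by omega) (rmc k cols) (Mrest.map (rmc k))
        · rw [rmc_length k cols (by omega)]; omega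
        · omega
        · rw [List.length_map]; omega
        · intro row' hrow'
          obtain ⟨row, hrowm, rfl⟩ := List.mem_map.mp hrow'
          have hlenr := hfat row (List.mem_cons_of_mem _ hrowm)
          rw [rmc_length k row (by omega)]
          omega
        · intro i p hi hp
          have hiM : i < Mrest.length := by omega
          rw [rmc_get_of_map (rmc k) Mrest [] hiM]
          have hrowlen : n ≤ Mrest[i].length :=
            hfat _ (List.mem_cons_of_mem _ (List.getElem_mem hiM))
          rw [rmc_get k p Mrest[i] (by omega) (by omega)]
          rw [rmc_get k p cols (by omega) (by omega)]
          have hMi : ∀ q : Nat, PySem.List.pyGetD Mrest[i] (q : Int) 0 =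
              PySem.List.pyGetD (PySem.List.pyGetD (M0 :: Mrest) ((i + 1 : Nat) : Int) []) (q : Int) 0 := by
            intro q
            simp only [PySem.List.pyGetD_natCast, List.getD_cons_succ]
            rw [List.getD_eq_getElem _ _ hiM]
          have hidx : (rows.length - (n - 1) + i : Nat) = (rows.length - n + (i + 1) : Nat) := by omega
          split_ifs with hpk
          · rw [hMi p, hent (i + 1) p (by omega) (by omega), hidx]
          · rw [hMi (p + 1), hent (i + 1) (p + 1) (by omega) (by omega), hidx]
      rw [List.map_congr_left hterm]
      apply pymod_congr hm
      rw [specD_eq_sum rows cols (by intro h; rw [h] at hcols; simp at hcols; omega)]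
      rw [hcols]
      apply dvd_sum_sub
      intro k hk
      have hkn : k < n := List.mem_range.mp hk
      have e0k := hent 0 k (by omega) (by omega)
      have hM00 : PySem.List.pyGetD (M0 :: Mrest) ((0 : Nat) : Int) [] = M0 := by simp
      rw [hM00] at e0k
      have hKidx : ((rows.length : Int) - (n : Int)) = ((rows.length - n + 0 : Nat) : Int) := by omega
      have heq : (-1 : Int) ^ k * PySem.List.pyGetD M0 (k : Int) 0 *
            PySem.Int.mod (specD rows (rmc k cols)) m -
          (-1 : Int) ^ k *
            PySem.List.pyGetD (PySem.List.pyGetD rows ((rows.length : Int) - (n : Int)) [])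
              (PySem.List.pyGetD cols (k : Int) 0) 0 *
            specD rows (rmc k cols) =
          ((-1 : Int) ^ k * PySem.List.pyGetD M0 (k : Int) 0) *
            (PySem.Int.mod (specD rows (rmc k cols)) m - specD rows (rmc k cols)) := by
        rw [hKidx, ← e0k]
        ring
      rw [heq]
      apply Dvd.dvd.mul_left
      simpa using (pymod_sub_dvd (specD rows (rmc k cols)) m).neg_right

-- enumerate/filter characterisations
theorem zipIdx_filter_all {α : Type} :
    ∀ (l : List α) (t : Nat) (r : Int), r < (t : Int) →
      ((l.zipIdx t).filter (fun p => ((p.2 : Int) != r))).map Prod.fst = l := by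
  intro l
  induction l with
  | nil => intro t r _; simp
  | cons x xs ih =>
    intro t r hr
    simp only [List.zipIdx_cons, List.filter_cons]
    rw [if_pos (by simp; omega)]
    simp only [List.map_cons]
    rw [ih (t + 1) r (by push_cast; omega)]

theorem zipIdx_filter_ne {α : Type} :
    ∀ (l : List α) (t rn : Nat),
      ((l.zipIdx t).filter (fun p => ((p.2 : Int) != ((t + rn : Nat) : Int)))).map Prod.fst =
        l.take rn ++ l.drop (rn + 1) := by
  intro l
  induction l with
  | nil => intro t rn; simp
  | cons x xs ih =>
    intro t rn
    simp only [List.zipIdx_cons, List.filter_cons]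
    cases rn with
    | zero =>
      rw [if_neg (by simp)]
      rw [zipIdx_filter_all xs (t + 1) ((t + 0 : Nat) : Int) (by push_cast; omega)]
      simp
    | succ s =>
      rw [if_pos (by simp; omega)]
      simp only [List.map_cons]
      have hih := ih (t + 1) s
      rw [show ((t + 1) + s : Nat) = (t + (s + 1) : Nat) by omega] at hih
      rw [hih]
      simp [List.take_succ_cons, List.drop_succ_cons]

theorem minorA_eq (mat : List (List Int)) (r c : Nat) :
    minorA mat (r : Int) (c : Int) = (rmc r mat).map (rmc c) := by
  unfold minorA
  have hz := zipIdx_filter_ne mat 0 r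
  simp only [Nat.zero_add] at hz
  have hcomp : ((mat.zipIdx.filter (fun p => ((p.2 : Int) != (r : Int)))).map Prod.fst).map
      (fun row => PySem.List.slice row none (some (c : Int)) ++
        PySem.List.slice row (some ((c : Int) + 1)) none) =
      (mat.zipIdx.filter (fun p => ((p.2 : Int) != (r : Int)))).map
      (fun p => PySem.List.slice p.1 none (some (c : Int)) ++
        PySem.List.slice p.1 (some ((c : Int) + 1)) none) := by
    rw [List.map_map]
    rfl
  rw [← hcomp, hz]
  show (rmc r mat).map _ = (rmc r mat).map (rmc c)
  apply List.map_congr_left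
  intro row _
  exact slice_rmc c row

-- the filtered column-index list B uses
def colsOfI (n : Nat) (c : Int) : List Int :=
  (PySem.List.pyRange 0 (n : Int) 1).filter (fun j => j != c)

theorem colsOfI_split (n c : Nat) (hc : c < n) :
    colsOfI n (c : Int) =
      PySem.List.pyRange 0 (c : Int) 1 ++ PySem.List.pyRange ((c : Int) + 1) (n : Int) 1 := by
  unfold colsOfI
  rw [PySem.List.pyRange_one_append 0 (c : Int) (n : Int) (by omega) (by omega)]
  rw [List.filter_append]
  congr 1
  · apply List.filter_eq_self.mpr
    intro x hx
    have hb := PySem.List.mem_pyRange_one.mp hx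
    simp; omega
  · rw [PySem.List.pyRange_one_cons (show (c : Int) < (n : Int) by omega)]
    rw [List.filter_cons]
    rw [if_neg (by simp)]
    apply List.filter_eq_self.mpr
    intro x hx
    have hb := PySem.List.mem_pyRange_one.mp hx
    simp; omega

theorem colsOfI_length (n c : Nat) (hc : c < n) : (colsOfI n (c : Int)).length = n - 1 := by
  rw [colsOfI_split n c hc]
  rw [List.length_append, PySem.List.length_pyRange_one, PySem.List.length_pyRange_one]
  omega

theorem colsOfI_get (n c p : Nat) (hc : c < n) (hp : p < n - 1) :
    PySem.List.pyGetD (colsOfI n (c : Int)) (p : Int) 0 =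
      if p < c then ((p : Nat) : Int) else ((p + 1 : Nat) : Int) := by
  rw [colsOfI_split n c hc]
  have hl1 : (PySem.List.pyRange 0 (c : Int) 1).length = c := by
    rw [PySem.List.length_pyRange_one]; omega
  have hl2 : (PySem.List.pyRange ((c : Int) + 1) (n : Int) 1).length = n - (c + 1) := by
    rw [PySem.List.length_pyRange_one]; omega
  simp only [PySem.List.pyGetD_natCast]
  rw [List.getD_eq_getElem _ _ (by rw [List.length_append, hl1, hl2]; omega)]
  split_ifs with h
  · rw [List.getElem_append_left (by rw [hl1]; omega)]
    rw [PySem.List.getElem_pyRange_one]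
    omega
  · rw [List.getElem_append_right (by rw [hl1]; omega)]
    rw [PySem.List.getElem_pyRange_one]
    rw [hl1]
    omega

-- the cell values of the two results
def Aval (mat : List (List Int)) (m : Int) (r c : Nat) : Int :=
  PySem.Int.mod ((-1 : Int) ^ (r + c) * detA (minorA mat (r : Int) (c : Int)) m) m

def Bval (mat : List (List Int)) (m : Int) (r c : Nat) : Int :=
  PySem.Int.mod ((-1 : Int) ^ (r + c) * specD (rmc r mat) (colsOfI mat.length (c : Int))) m

theorem map_pyRange_eq {α : Type} (n : Nat) (F : Int → α) (G : Nat → α)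
    (h : ∀ k, k < n → F ((k : Nat) : Int) = G k) :
    (PySem.List.pyRange 0 (n : Int) 1).map F = (List.range n).map G := by
  rw [PySem.List.pyRange_zero_nat n, List.map_map]
  apply List.map_congr_left
  intro k hk
  exact h k (List.mem_range.mp hk)

theorem set_append_len {α : Type} :
    ∀ (xs : List α) (v y : α) (ys : List α) (i : Nat), i = xs.length →
      (xs ++ y :: ys).set i v = xs ++ v :: ys := by
  intro xs
  induction xs with
  | nil => intro v y ys i hi; subst hi; simp
  | cons x xs ih =>
    intro v y ys i hi
    subst hi
    simp only [List.cons_append, List.length_cons, List.set_cons_succ]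
    rw [ih _ _ _ _ rfl]

-- the inner assignment loop of A touches only row r
theorem A_inner_fold (val : Int → Int) (r : Nat) :
    ∀ (cs : List Int) (cof : List (List Int)), r < cof.length →
      cs.foldl (fun cof c => PySem.List.pySetD cof ((r : Nat) : Int)
        (PySem.List.pySetD (PySem.List.pyGetD cof ((r : Nat) : Int) []) c (val c))) cof =
      cof.set r (cs.foldl (fun row c => PySem.List.pySetD row c (val c)) (cof.getD r [])) := by
  intro cs
  induction cs with
  | nil =>
    intro cof hr
    simp only [List.foldl_nil]
    rw [List.getD_eq_getElem _ _ hr, List.set_getElem_self]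
  | cons c cs ih =>
    intro cof hr
    simp only [List.foldl_cons]
    rw [show PySem.List.pySetD cof ((r : Nat) : Int)
        (PySem.List.pySetD (PySem.List.pyGetD cof ((r : Nat) : Int) []) c (val c)) =
        cof.set r (PySem.List.pySetD (PySem.List.pyGetD cof ((r : Nat) : Int) []) c (val c)) from
      PySem.List.pySetD_natCast cof r _]
    rw [ih _ (by simpa using hr)]
    rw [List.set_set]
    congr 1
    simp only [PySem.List.pyGetD_natCast]
    rw [List.getD_eq_getElem _ _ (by simpa using hr), List.getElem_set_self]
    try rw [List.getD_eq_getElem _ _ hr]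

-- the inner assignment loop fills one row left to right
theorem A_row_fold (val : Int → Int) (N : Nat) :
    ∀ (kk : Nat), kk ≤ N → ∀ (row : List Int), row.length = N →
      (PySem.List.pyRange 0 ((kk : Nat) : Int) 1).foldl
          (fun row c => PySem.List.pySetD row c (val c)) row =
        (List.range kk).map (fun j => val ((j : Nat) : Int)) ++ row.drop kk := by
  intro kk
  induction kk with
  | zero =>
    intro _ row _
    rw [show (((0 : Nat)) : Int) = (0 : Int) from rfl]
    rw [PySem.List.pyRange_one_eq_nil (le_refl 0)]
    simp
  | succ kk ih =>
    intro hkk row hrow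
    rw [show (((kk + 1 : Nat)) : Int) = ((kk : Nat) : Int) + 1 by push_cast; ring]
    rw [PySem.List.pyRange_one_succ_right (by positivity)]
    rw [List.foldl_append]
    rw [ih (by omega) row hrow]
    simp only [List.foldl_cons, List.foldl_nil]
    rw [PySem.List.pySetD_natCast]
    rw [List.drop_eq_getElem_cons (show kk < row.length by omega)]
    rw [set_append_len _ _ _ _ kk (by simp)]
    rw [List.range_succ, List.map_append]
    simp

-- the outer loop of A fills the cofactor grid row by row
theorem A_outer_fold (mat : List (List Int)) (m : Int) :
    ∀ (kk : Nat), kk ≤ mat.length →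
      (PySem.List.pyRange 0 ((kk : Nat) : Int) 1).foldl
          (fun cof r => (PySem.List.pyRange 0 (mat.length : Int) 1).foldl
            (fun cof c => PySem.List.pySetD cof r
              (PySem.List.pySetD (PySem.List.pyGetD cof r []) c
                (PySem.Int.mod ((-1 : Int) ^ (r + c).toNat * detA (minorA mat r c) m) m))) cof)
          (List.replicate mat.length (List.replicate mat.length 0)) =
        (List.range kk).map (fun r => (List.range mat.length).map (fun c => Aval mat m r c)) ++
          List.replicate (mat.length - kk) (List.replicate mat.length 0) := by
  intro kk
  induction kk with
  | zero =>
    rw [show (((0 : Nat)) : Int) = (0 : Int) from rfl]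
    rw [PySem.List.pyRange_one_eq_nil (le_refl 0)]
    intro _
    simp
  | succ kk ih =>
    intro hkk
    rw [show (((kk + 1 : Nat)) : Int) = ((kk : Nat) : Int) + 1 by push_cast; ring]
    rw [PySem.List.pyRange_one_succ_right (by positivity)]
    rw [List.foldl_append]
    rw [ih (by omega)]
    simp only [List.foldl_cons, List.foldl_nil]
    rw [A_inner_fold (fun c => PySem.Int.mod
        ((-1 : Int) ^ (((kk : Nat) : Int) + c).toNat * detA (minorA mat ((kk : Nat) : Int) c) m) m)
      kk (PySem.List.pyRange 0 (mat.length : Int) 1) _ (by simp; omega)]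
    have hprevk : ((List.range kk).map (fun r => (List.range mat.length).map (fun c => Aval mat m r c)) ++
        List.replicate (mat.length - kk) (List.replicate mat.length 0)).getD kk [] =
        List.replicate mat.length 0 := by
      rw [List.getD_eq_getElem _ _ (by simp; omega)]
      rw [List.getElem_append_right (by simp)]
      simp
    rw [hprevk]
    rw [A_row_fold _ mat.length mat.length (le_refl _) _ (by simp)]
    rw [List.drop_replicate]
    simp only [Nat.sub_self, List.replicate_zero, List.append_nil]
    have hrowval : (List.range mat.length).map (fun j => (fun c => PySem.Int.mod
        ((-1 : Int) ^ (((kk : Nat) : Int) + c).toNat * detA (minorA mat ((kk : Nat) : Int) c) m) m)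
          ((j : Nat) : Int)) =
        (List.range mat.length).map (fun c => Aval mat m kk c) := by
      apply List.map_congr_left
      intro j _
      unfold Aval
      show PySem.Int.mod ((-1 : Int) ^ (((kk : Nat) : Int) + ((j : Nat) : Int)).toNat *
          detA (minorA mat ((kk : Nat) : Int) ((j : Nat) : Int)) m) m = _
      rw [show ((kk : Nat) : Int) + ((j : Nat) : Int) = ((kk + j : Nat) : Int) by push_cast; ring]
      rw [Int.toNat_natCast]
    rw [hrowval]
    rw [show mat.length - kk = (mat.length - (kk + 1)) + 1 by omega, List.replicate_succ]
    rw [set_append_len _ _ _ _ kk (by simp)]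
    rw [List.range_succ, List.map_append]
    simp

theorem A_assembly (mat : List (List Int)) (m : Int) :
    matrix_cofactor_matrix_py mat m =
      (List.range mat.length).map (fun r => (List.range mat.length).map (fun c => Aval mat m r c)) := by
  unfold matrix_cofactor_matrix_py
  have hcof0 : (PySem.List.pyRange 0 (mat.length : Int) 1).map
      (fun _ => PySem.List.pyRepeat [(0 : Int)] (mat.length : Int)) =
      List.replicate mat.length (List.replicate mat.length 0) := by
    rw [PySem.List.pyRepeat_singleton, Int.toNat_natCast]
    rw [List.map_const']
    have hlen0 : ((mat.length : Int) - 0).toNat = mat.length := by omega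
    rw [PySem.List.length_pyRange_one, hlen0]
  rw [hcof0]
  rw [A_outer_fold mat m mat.length (le_refl _)]
  try simp

-- B's inner loop appends one reduced cofactor per column
theorem B_inner_fold (rows : List (List Int)) (m : Int) (n : Nat) (r : Int) :
    ∀ (cs : List Int) (acc : List Int) (memo : PySem.Dict (List Int) Int), MemoInv rows memo →
      (cs.foldl (fun (st : List Int × PySem.Dict (List Int) Int) c =>
          (st.1 ++ [PySem.Int.mod ((-1 : Int) ^ (r + c).toNat *
              (bdet rows ((PySem.List.pyRange 0 (n : Int) 1).filter (fun j => j != c)) st.2).1) m],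
            (bdet rows ((PySem.List.pyRange 0 (n : Int) 1).filter (fun j => j != c)) st.2).2))
        (acc, memo)).1 =
      acc ++ cs.map (fun c => PySem.Int.mod ((-1 : Int) ^ (r + c).toNat * specD rows (colsOfI n c)) m) := by
  intro cs
  induction cs with
  | nil => intro acc memo _; simp
  | cons c cs ih =>
    intro acc memo hmemo
    simp only [List.foldl_cons]
    obtain ⟨h1, h2⟩ := bdet_spec rows
      ((PySem.List.pyRange 0 (n : Int) 1).filter (fun j => j != c)).length
      ((PySem.List.pyRange 0 (n : Int) 1).filter (fun j => j != c)) rfl memo hmemo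
    rw [ih _ _ h2]
    rw [h1]
    rw [show specD rows ((PySem.List.pyRange 0 (n : Int) 1).filter (fun j => j != c)) =
        specD rows (colsOfI n c) from rfl]
    simp

theorem B_assembly (mat : List (List Int)) (m : Int) :
    matrix_cofactor_matrix_py_alt mat m =
      (List.range mat.length).map (fun r => (List.range mat.length).map (fun c => Bval mat m r c)) := by
  unfold matrix_cofactor_matrix_py_alt
  rw [PySem.List.foldl_append_singleton_eq_map]
  rw [List.nil_append]
  apply map_pyRange_eq
  intro rk _hrk
  rw [slice_rmc rk mat]
  rw [B_inner_fold (rmc rk mat) m mat.length ((rk : Nat) : Int) _ [] PySem.Dict.empty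
    (memoInv_empty _)]
  rw [List.nil_append]
  apply map_pyRange_eq
  intro ck _hck
  unfold Bval
  rw [show ((rk : Nat) : Int) + ((ck : Nat) : Int) = ((rk + ck : Nat) : Int) by push_cast; ring]
  rw [Int.toNat_natCast]

-- cell-level agreement for matrices of size at least 2
theorem percell (mat : List (List Int)) (m : Int) (hm : m ≠ 0) (hn2 : 2 ≤ mat.length)
    (hfat : ∀ row ∈ mat, mat.length ≤ row.length) (r c : Nat)
    (hr : r < mat.length) (hc : c < mat.length) :
    Aval mat m r c = Bval mat m r c := by
  have hrows : (rmc r mat).length = mat.length - 1 := rmc_length r mat hr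
  have hdet : detA (minorA mat (r : Int) (c : Int)) m =
      PySem.Int.mod (specD (rmc r mat) (colsOfI mat.length (c : Int))) m := by
    rw [minorA_eq]
    apply detA_eq_specD m hm (rmc r mat) (mat.length - 1) (by omega)
      (colsOfI mat.length (c : Int)) ((rmc r mat).map (rmc c))
      (colsOfI_length mat.length c hc) (by omega) (by rw [List.length_map]; omega)
    · intro row' hrow'
      obtain ⟨row, hrowm, rfl⟩ := List.mem_map.mp hrow'
      have hlen := hfat row (mem_rmc hrowm)
      rw [rmc_length c row (by omega)]
      omega
    · intro i p hi hp
      have hiM : i < (rmc r mat).length := by omega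
      rw [rmc_get_of_map (rmc c) (rmc r mat) [] hiM]
      have hrowlen : mat.length ≤ (rmc r mat)[i].length :=
        hfat _ (mem_rmc (List.getElem_mem hiM))
      rw [rmc_get c p (rmc r mat)[i] (by omega) (by omega)]
      rw [show ((rmc r mat).length - (mat.length - 1) + i : Nat) = i by omega]
      have hrowsi : PySem.List.pyGetD (rmc r mat) ((i : Nat) : Int) [] = (rmc r mat)[i] := by
        simp only [PySem.List.pyGetD_natCast]
        exact List.getD_eq_getElem _ _ hiM
      rw [hrowsi]
      rw [colsOfI_get mat.length c p hc hp]
      split_ifs with hpc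
      · rfl
      · rfl
  unfold Aval Bval
  rw [hdet]
  apply pymod_congr hm
  have heq : (-1 : Int) ^ (r + c) *
        PySem.Int.mod (specD (rmc r mat) (colsOfI mat.length (c : Int))) m -
      (-1 : Int) ^ (r + c) * specD (rmc r mat) (colsOfI mat.length (c : Int)) =
      (-1 : Int) ^ (r + c) *
        (PySem.Int.mod (specD (rmc r mat) (colsOfI mat.length (c : Int))) m -
          specD (rmc r mat) (colsOfI mat.length (c : Int))) := by ring
  rw [heq]
  apply Dvd.dvd.mul_left
  simpa using (pymod_sub_dvd (specD (rmc r mat) (colsOfI mat.length (c : Int))) m).neg_right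

-- the 1x1 case, where the two programs differ
theorem one_by_one_A (row : List Int) (m : Int) (hm : m ≠ 0) :
    matrix_cofactor_matrix_py [row] m = [[0]] := by
  rw [A_assembly]
  rw [show ([row] : List (List Int)).length = 1 from rfl, List.range_one]
  simp only [List.map_cons, List.map_nil]
  have hminor : minorA [row] ((0 : Nat) : Int) ((0 : Nat) : Int) = [] := by
    rw [minorA_eq]
    rfl
  have hdet : detA ([] : List (List Int)) m = PySem.Int.mod 0 m := by
    rw [detA]
    simp
  unfold Aval
  rw [hminor, hdet, pymod_zero_left hm, mul_zero, pymod_zero_left hm]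

theorem one_by_one_B (row : List Int) (m : Int) :
    matrix_cofactor_matrix_py_alt [row] m = [[PySem.Int.mod 1 m]] := by
  rw [B_assembly]
  rw [show ([row] : List (List Int)).length = 1 from rfl, List.range_one]
  simp only [List.map_cons, List.map_nil]
  unfold Bval
  rw [show ([row] : List (List Int)).length = 1 from rfl]
  rw [show colsOfI 1 ((0 : Nat) : Int) = [] from rfl]
  rw [specD_nil]
  norm_num

-- ===== VERDICT (by name: the statement is the Claim_ definition above) =====
theorem matrix_cofactor_matrix_py_spec : Claim_unchanged_matrix_cofactor_matrix_py := by
  intro mat m _hdom hpre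
  unfold Spec_matrix_cofactor_matrix_py
  intro hnd
  obtain ⟨hpre1, hpre2⟩ := hpre
  rw [A_assembly, B_assembly]
  apply List.map_congr_left
  intro r hr
  apply List.map_congr_left
  intro c hc
  have hrn := List.mem_range.mp hr
  have hcn := List.mem_range.mp hc
  rcases Nat.lt_or_ge mat.length 2 with hsmall | hn2
  · have hlen1 : mat.length = 1 := by omega
    have hm1 : m = 1 ∨ m = -1 := by
      unfold D_matrix_cofactor_matrix_py at hnd
      by_cases h1 : m = 1
      · exact Or.inl h1
      · by_cases h2 : m = -1
        · exact Or.inr h2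
        · exact absurd ⟨hlen1, h1, h2⟩ hnd
    unfold Aval Bval
    rw [pymod_pm_one hm1, pymod_pm_one hm1]
  · have hmne : mat ≠ [] := by intro h; rw [h] at hn2; simp at hn2
    have hm0 : m ≠ 0 := by
      rcases hpre1 with h | h
      · exact h
      · exact absurd h hmne
    exact percell mat m hm0 hn2 (hpre2 hn2) r c hrn hcn

theorem matrix_cofactor_matrix_py_changed : Claim_changed_matrix_cofactor_matrix_py := by
  unfold Claim_changed_matrix_cofactor_matrix_py
  refine ⟨by decide, by decide, by decide, ?_, ?_, by decide⟩
  · show matrix_cofactor_matrix_py [[5]] 7 = [[0]]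
    exact one_by_one_A [5] 7 (by norm_num)
  · show matrix_cofactor_matrix_py_alt [[5]] 7 = [[1]]
    rw [one_by_one_B]
    decide

theorem matrix_cofactor_matrix_py_tight : Claim_exact_matrix_cofactor_matrix_py := by
  intro mat m _hdom hpre hd
  obtain ⟨hlen1, hm1, hm1'⟩ := hd
  obtain ⟨row, rfl⟩ := List.length_eq_one_iff.mp hlen1
  have hm0 : m ≠ 0 := by
    rcases hpre.1 with h | h
    · exact h
    · simp at h
  rw [one_by_one_A row m hm0, one_by_one_B]
  intro heq
  have h0 : (0 : Int) = PySem.Int.mod 1 m :=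
    List.head_eq_of_cons_eq (List.head_eq_of_cons_eq heq)
  have hdvd : m ∣ 1 := (PySem.Int.mod_eq_zero_iff_dvd 1 m).mp h0.symm
  have hu := Int.isUnit_iff.mp (isUnit_of_dvd_one hdvd)
  tauto
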